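-- pv_equiv track=rewrite | github.com/dombunnett/ReducedFiniteDimensionalModules | reducedModules.py | property_check
-- ===== SOURCE A (Python) =====
-- def property_check(A,B):
--     T1set = B.copy()    # We copy the second set. If an element satisfies the
--                         # property we remove it from this set.
--     T1 = 0
--
--     for (a,b) in B:
--         if a>=-b and (a-1,b) in A and a>1:
--             T1set.remove((a,b))
--
--         if -b>=a and (a,b+1) in A and b<-1:
--             T1set.add((a,b))
--             T1set.remove((a,b))
--
--     if len(T1set)==0:   # If this set is empty, the T1 property holds and thus
--                         # T1 is true
--         T1 = 1
--     return T1
-- ===== SOURCE B (Python) =====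
-- def property_check(A, B):
--     # Build, from A alone, the set of pairs that A's certificates cover:
--     # (x,y) in A certifies (x+1,y) when x+1 >= -y and x+1 > 1,
--     # and certifies (x,y-1) when -(y-1) >= x and y-1 < -1.
--     covered = set()
--     for (x, y) in A:
--         if x + 1 >= -y and x + 1 > 1:
--             covered.add((x + 1, y))
--         if -(y - 1) >= x and y - 1 < -1:
--             covered.add((x, y - 1))
--     return 1 if set(B) <= covered else 0
-- ===== Notes on version B (the rewrite author's own statement) =====
-- stated objective: alternative
-- what changed: B reverses the traversal: instead of scanning B and testing each element against A (mutating a copied set and checking emptiness), B makes one pass over A building a hash set of all pairs A's two conditions can certify, then returns 1 iff set(B) is a subset of that set; the per-element scan of A disappears.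
import Mathlib
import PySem

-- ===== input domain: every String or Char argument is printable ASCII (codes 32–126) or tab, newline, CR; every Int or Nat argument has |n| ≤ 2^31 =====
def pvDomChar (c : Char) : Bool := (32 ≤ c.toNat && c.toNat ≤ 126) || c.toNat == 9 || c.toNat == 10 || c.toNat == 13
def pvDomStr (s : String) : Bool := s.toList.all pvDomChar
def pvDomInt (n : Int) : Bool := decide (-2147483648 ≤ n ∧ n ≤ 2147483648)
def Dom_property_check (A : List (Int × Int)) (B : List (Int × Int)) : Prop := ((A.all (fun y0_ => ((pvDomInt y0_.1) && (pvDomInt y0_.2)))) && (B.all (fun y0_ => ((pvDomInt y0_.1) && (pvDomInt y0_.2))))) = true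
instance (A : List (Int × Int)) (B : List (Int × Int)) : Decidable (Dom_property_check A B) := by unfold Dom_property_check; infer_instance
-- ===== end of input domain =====

-- B builds, in one pass over A, the set of pairs A's conditions certify, then
-- tests B for subset — a reversed traversal replacing A's mutated copy of B
-- (objective: alternative).


-- ===== PORT A =====
-- one iteration of A's loop body; `none` = KeyError from set.remove
def pcStep (A : List (Int × Int)) (st : Option (PySem.Set (Int × Int))) (p : Int × Int) :
    Option (PySem.Set (Int × Int)) :=
  match st with
  | none => none
  | some s =>
    let s1? := if decide (p.1 ≥ -p.2) && decide ((p.1 - 1, p.2) ∈ A) && decide (p.1 > 1)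
               then PySem.Set.remove? s p else some s
    match s1? with
    | none => none
    | some s1 =>
      if decide (-p.2 ≥ p.1) && decide ((p.1, p.2 + 1) ∈ A) && decide (p.2 < -1)
      then PySem.Set.remove? (PySem.Set.add s1 p) p
      else some s1

def property_check (A : List (Int × Int)) (B : List (Int × Int)) : Int :=
  match B.foldl (pcStep A) (some B) with
  | some T1set => if PySem.Set.len T1set = 0 then 1 else 0
  | none => 0   -- unreachable under Pre_ (Python would raise KeyError)

-- ===== PORT B =====
-- the set `covered` built by B's single pass over A
def pcCovered (A : List (Int × Int)) : PySem.Set (Int × Int) :=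
  A.foldl (fun c p =>
    let c1 := if decide (p.1 + 1 ≥ -p.2) && decide (p.1 + 1 > 1)
              then PySem.Set.add c (p.1 + 1, p.2) else c
    if decide (-(p.2 - 1) ≥ p.1) && decide (p.2 - 1 < -1)
    then PySem.Set.add c1 (p.1, p.2 - 1) else c1) PySem.Set.empty

def property_check_alt (A : List (Int × Int)) (B : List (Int × Int)) : Int :=
  if PySem.Set.issubset (PySem.Set.ofList B) (pcCovered A) then 1 else 0

-- ===== PRECONDITION & SPEC =====
-- The Python arguments are sets; under the type convention the list B holds the set's
-- DISTINCT elements, so Pre_ only states that representation invariant (it excludes no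
-- actual Python input of A).
def Pre_property_check (A : List (Int × Int)) (B : List (Int × Int)) : Prop := B.Nodup
instance (A : List (Int × Int)) (B : List (Int × Int)) : Decidable (Pre_property_check A B) := by unfold Pre_property_check; infer_instance
def pvWitness_property_check : (List (Int × Int)) × (List (Int × Int)) := ([(1, 2), (2, -2)], [(3, 2), (1, -2)])

def Spec_property_check (A : List (Int × Int)) (B : List (Int × Int)) (out : Int) : Prop := out = property_check_alt A B
instance (A : List (Int × Int)) (B : List (Int × Int)) (out : Int) : Decidable (Spec_property_check A B out) := by unfold Spec_property_check; infer_instance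

-- ===== CLAIM (what is proved, stated in full; the proofs are below) =====
def Claim_equal_property_check : Prop := ∀ (A : List (Int × Int)) (B : List (Int × Int)), Dom_property_check A B → Pre_property_check A B → Spec_property_check A B (property_check A B)

-- ===== LEMMAS AND PROOFS =====

-- the combined removal condition A tests for each (a,b) of B
def pcCond (A : List (Int × Int)) (p : Int × Int) : Bool :=
  (decide (p.1 ≥ -p.2) && decide ((p.1 - 1, p.2) ∈ A) && decide (p.1 > 1))
  || (decide (-p.2 ≥ p.1) && decide ((p.1, p.2 + 1) ∈ A) && decide (p.2 < -1))

-- one loop iteration of A on an element present in the state is a net discard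
-- exactly when pcCond holds
theorem pcStep_eq (A : List (Int × Int)) (s : List (Int × Int)) (p : Int × Int)
    (hp : p ∈ s) :
    pcStep A (some s) p = some (if pcCond A p then PySem.Set.discard s p else s) := by
  have hne : p ∉ PySem.Set.discard s p := by simp [PySem.Set.mem_discard]
  unfold pcStep pcCond
  by_cases h1 : (decide (p.1 ≥ -p.2) && decide ((p.1 - 1, p.2) ∈ A) && decide (p.1 > 1)) = true <;>
    by_cases h2 : (decide (-p.2 ≥ p.1) && decide ((p.1, p.2 + 1) ∈ A) && decide (p.2 < -1)) = true <;>
    simp only [h1, h2, Bool.true_or, Bool.false_or, if_pos, if_neg, Bool.not_eq_true,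
      PySem.Set.remove?_of_mem hp, PySem.Set.add_of_mem hp] <;>
    simp [PySem.Set.remove?_of_mem, hp, PySem.Set.discard, List.filter_append,
      List.filter_filter, List.mem_filter]

-- loop invariant for A: folding the remaining elements l over a state s containing
-- them removes exactly the elements of l that satisfy pcCond
theorem pcLoop_eq (A : List (Int × Int)) :
    ∀ (l s : List (Int × Int)), l.Nodup → (∀ p ∈ l, p ∈ s) →
      l.foldl (pcStep A) (some s) =
        some (s.filter (fun q => !(l.contains q && pcCond A q)))
  | [], s, _, _ => by simp
  | p :: l', s, hl, hsub => by
    have hp : p ∈ s := hsub p (List.mem_cons_self)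
    have hpl' : p ∉ l' := (List.nodup_cons.mp hl).1
    have hl' : l'.Nodup := (List.nodup_cons.mp hl).2
    rw [List.foldl_cons, pcStep_eq A s p hp]
    by_cases hc : pcCond A p = true
    · rw [if_pos hc]
      rw [pcLoop_eq A l' (PySem.Set.discard s p) hl'
        (fun q hq => (PySem.Set.mem_discard s p q).mpr
          ⟨hsub q (List.mem_cons_of_mem _ hq), by rintro rfl; exact hpl' hq⟩)]
      congr 1
      unfold PySem.Set.discard
      rw [List.filter_filter]
      apply List.filter_congr
      intro q hq
      by_cases hqp : q = p
      · subst hqp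
        simp [hc, hpl']
      · simp [hqp, Ne.symm hqp]
    · rw [if_neg hc]
      rw [pcLoop_eq A l' s hl' (fun q hq => hsub q (List.mem_cons_of_mem _ hq))]
      congr 1
      apply List.filter_congr
      intro q hq
      by_cases hqp : q = p
      · subst hqp
        simp [hc, hpl']
      · simp [hqp]

-- membership in B's fold state: q is there iff it was already, or some element of
-- the scanned prefix certifies it
theorem mem_pcCovered_fold (q : Int × Int) :
    ∀ (A : List (Int × Int)) (c : PySem.Set (Int × Int)),
      q ∈ A.foldl (fun c p =>
        let c1 := if decide (p.1 + 1 ≥ -p.2) && decide (p.1 + 1 > 1)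
                  then PySem.Set.add c (p.1 + 1, p.2) else c
        if decide (-(p.2 - 1) ≥ p.1) && decide (p.2 - 1 < -1)
        then PySem.Set.add c1 (p.1, p.2 - 1) else c1) c
      ↔ q ∈ c ∨ ∃ p ∈ A,
          (q = (p.1 + 1, p.2) ∧ p.1 + 1 ≥ -p.2 ∧ p.1 + 1 > 1)
          ∨ (q = (p.1, p.2 - 1) ∧ -(p.2 - 1) ≥ p.1 ∧ p.2 - 1 < -1)
  | [], c => by simp
  | p :: A', c => by
    rw [List.foldl_cons, mem_pcCovered_fold q A']
    constructor
    · rintro (hmem | ⟨r, hr, h⟩)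
      · cases h1 : (decide (p.1 + 1 ≥ -p.2) && decide (p.1 + 1 > 1)) <;>
          cases h2 : (decide (-(p.2 - 1) ≥ p.1) && decide (p.2 - 1 < -1)) <;>
          simp only [h1, h2, Bool.false_eq_true, if_true, if_false, reduceIte,
            PySem.Set.mem_add] at hmem <;>
          (try simp only [Bool.and_eq_true, decide_eq_true_eq] at h1 h2)
        · exact Or.inl hmem
        · rcases hmem with hmem | rfl
          · exact Or.inl hmem
          · exact Or.inr ⟨p, List.mem_cons_self, Or.inr ⟨rfl, h2.1, h2.2⟩⟩
        · rcases hmem with hmem | rfl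
          · exact Or.inl hmem
          · exact Or.inr ⟨p, List.mem_cons_self, Or.inl ⟨rfl, h1.1, h1.2⟩⟩
        · rcases hmem with (hmem | rfl) | rfl
          · exact Or.inl hmem
          · exact Or.inr ⟨p, List.mem_cons_self, Or.inl ⟨rfl, h1.1, h1.2⟩⟩
          · exact Or.inr ⟨p, List.mem_cons_self, Or.inr ⟨rfl, h2.1, h2.2⟩⟩
      · exact Or.inr ⟨r, List.mem_cons_of_mem _ hr, h⟩
    · rintro (hmem | ⟨r, hr, h⟩)
      · left
        split_ifs <;> simp [PySem.Set.mem_add, hmem]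
      · rcases List.mem_cons.mp hr with rfl | hr'
        · left
          rcases h with ⟨rfl, h1, h2⟩ | ⟨rfl, h1, h2⟩ <;>
            split_ifs <;> simp_all [PySem.Set.mem_add]
        · exact Or.inr ⟨r, hr', h⟩

-- q is covered exactly when A's combined removal condition holds of q
theorem mem_pcCovered (A : List (Int × Int)) (q : Int × Int) :
    q ∈ pcCovered A ↔ pcCond A q = true := by
  unfold pcCovered pcCond
  rw [mem_pcCovered_fold]
  simp only [PySem.Set.empty]
  constructor
  · rintro (h | ⟨p, hp, ⟨rfl, h1, h2⟩ | ⟨rfl, h1, h2⟩⟩)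
    · simp at h
    · simp only [Bool.or_eq_true, Bool.and_eq_true, decide_eq_true_eq]
      exact Or.inl ⟨⟨by simpa using h1, by simpa using hp⟩, by simpa using h2⟩
    · simp only [Bool.or_eq_true, Bool.and_eq_true, decide_eq_true_eq]
      exact Or.inr ⟨⟨by simpa using h1, by simpa using hp⟩, by omega⟩
  · intro h
    simp only [Bool.or_eq_true, Bool.and_eq_true, decide_eq_true_eq] at h
    rcases h with ⟨⟨h1, hmem⟩, h2⟩ | ⟨⟨h1, hmem⟩, h2⟩
    · exact Or.inr ⟨(q.1 - 1, q.2), hmem, Or.inl ⟨by simp, by simpa using h1, by simpa using h2⟩⟩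
    · exact Or.inr ⟨(q.1, q.2 + 1), hmem, Or.inr ⟨by simp, by simpa using h1, by omega⟩⟩

-- ===== VERDICT (by name: the statement is the Claim_ definition above) =====
theorem property_check_spec : Claim_equal_property_check := by
  intro A B _ hpre
  unfold Spec_property_check property_check property_check_alt
  rw [pcLoop_eq A B B hpre (fun p hp => hp)]
  have hfe : B.filter (fun q => !(B.contains q && pcCond A q)) = B.filter (fun q => !pcCond A q) := by
    apply List.filter_congr
    intro q hq
    simp [hq]
  rw [hfe]
  show (if PySem.Set.len (B.filter fun q => !pcCond A q) = 0 then (1 : Int) else 0)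
      = if PySem.Set.issubset (PySem.Set.ofList B) (pcCovered A) then 1 else 0
  have key : (B.filter fun q => !pcCond A q).length = 0
      ↔ PySem.Set.issubset (PySem.Set.ofList B) (pcCovered A) = true := by
    rw [PySem.Set.issubset_iff]
    simp only [List.length_eq_zero_iff, List.filter_eq_nil_iff, Bool.not_eq_true',
      PySem.Set.mem_ofList]
    constructor
    · intro h x hx
      exact (mem_pcCovered A x).mpr (by
        rcases hc : pcCond A x with _ | _
        · exact absurd (h x hx) (by simp [hc])
        · rfl)
    · intro h q hq
      have := (mem_pcCovered A q).mp (h q hq)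
      simp [this]
  by_cases h : PySem.Set.issubset (PySem.Set.ofList B) (pcCovered A) = true
  · rw [if_pos h, if_pos (by simpa [PySem.Set.len] using key.mpr h)]
  · rw [if_neg (fun hz => h (key.mp (by simpa [PySem.Set.len] using hz))), if_neg h]
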